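-- pv_equiv track=rewrite | github.com/jadesym/interview | duplicateIntegers/duplicate.py | generatePreprocess
-- ===== SOURCE A (Python) =====
-- def generatePreprocess(numArray, low, high):
-- 	dpMatrix = [[0 for x in range(len(numArray))] for y in range(high-low+1)]
-- 	for index in range(len(numArray)):
-- 		num = numArray[index]
-- 		for number in range(0, high - low + 1):
-- 			if number + low == num:
-- 				if index == 0:
-- 					dpMatrix[number][0] = 1
-- 				else:
-- 					dpMatrix[number][index] = dpMatrix[number][index-1] + 1
-- 			else:
-- 				if index != 0:
-- 					dpMatrix[number][index] = dpMatrix[number][index-1]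
-- 	return dpMatrix
-- ===== SOURCE B (Python) =====
-- def generatePreprocess(numArray, low, high):
--     # Row-major: each row r is the running prefix count of the value low+r in numArray.
--     dpMatrix = []
--     for v in range(low, high + 1):
--         row = []
--         count = 0
--         for x in numArray:
--             if x == v:
--                 count += 1
--             row.append(count)
--         dpMatrix.append(row)
--     return dpMatrix
-- ===== Notes on version B (the rewrite author's own statement) =====
-- stated objective: alternative
-- what changed: Replaces A's column-major DP (for each index, update every row from the previous column) with independent row-major passes: for each value v in [low,high] build its row as a running prefix count over numArray.
import Mathlib
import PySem

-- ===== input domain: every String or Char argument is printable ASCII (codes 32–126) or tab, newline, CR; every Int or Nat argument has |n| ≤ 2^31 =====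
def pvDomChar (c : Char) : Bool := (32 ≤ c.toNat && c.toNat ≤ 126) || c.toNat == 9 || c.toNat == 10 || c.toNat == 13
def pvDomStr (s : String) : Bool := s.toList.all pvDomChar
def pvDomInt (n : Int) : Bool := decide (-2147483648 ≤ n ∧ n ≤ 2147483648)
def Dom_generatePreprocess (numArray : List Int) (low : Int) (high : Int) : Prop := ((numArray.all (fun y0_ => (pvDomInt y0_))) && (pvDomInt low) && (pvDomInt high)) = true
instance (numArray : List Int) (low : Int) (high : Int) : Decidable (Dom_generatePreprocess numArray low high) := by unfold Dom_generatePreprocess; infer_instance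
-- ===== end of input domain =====

-- B builds the matrix row by row (one prefix-count pass per value) instead of A's
-- column-major DP; same cost, different decomposition ("alternative").

-- ===== PORT A =====
-- Literal port of A's column-major DP.  All list indices the Python code uses are
-- nonnegative and in range (loop variables of range(...)), so `.toNat` on the set index
-- and `pyGetD` reads are exact here.
def generatePreprocess (numArray : List Int) (low : Int) (high : Int) : List (List Int) :=
  let dpMatrix : List (List Int) :=
    (PySem.List.pyRange 0 (high - low + 1) 1).map
      (fun _y => (PySem.List.pyRange 0 (numArray.length : Int) 1).map (fun _x => (0 : Int)))
  (PySem.List.pyRange 0 (numArray.length : Int) 1).foldl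
    (fun dpMatrix index =>
      let num := PySem.List.pyGetD numArray index 0
      (PySem.List.pyRange 0 (high - low + 1) 1).foldl
        (fun dpMatrix number =>
          let row := PySem.List.pyGetD dpMatrix number []
          if number + low == num then
            if index == 0 then
              dpMatrix.set number.toNat (row.set index.toNat 1)
            else
              dpMatrix.set number.toNat (row.set index.toNat (PySem.List.pyGetD row (index - 1) 0 + 1))
          else
            if index != 0 then
              dpMatrix.set number.toNat (row.set index.toNat (PySem.List.pyGetD row (index - 1) 0))
            else dpMatrix)
        dpMatrix)
    dpMatrix

-- ===== PORT B =====
-- inner loop of Source B: running count, appended at every position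
def pvAltRow (v : Int) (numArray : List Int) : Int × List Int :=
  numArray.foldl
    (fun st x =>
      let count := if x == v then st.1 + 1 else st.1
      (count, st.2 ++ [count]))
    ((0 : Int), ([] : List Int))

def generatePreprocess_alt (numArray : List Int) (low : Int) (high : Int) : List (List Int) :=
  (PySem.List.pyRange low (high + 1) 1).foldl
    (fun dpMatrix v => dpMatrix ++ [(pvAltRow v numArray).2]) []

-- ===== PRECONDITION & SPEC =====
def Spec_generatePreprocess (numArray : List Int) (low : Int) (high : Int) (out : List (List Int)) : Prop := out = generatePreprocess_alt numArray low high
instance (numArray : List Int) (low : Int) (high : Int) (out : List (List Int)) : Decidable (Spec_generatePreprocess numArray low high out) := by unfold Spec_generatePreprocess; infer_instance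

-- ===== CLAIM (what is proved, stated in full; the proofs are below) =====
def Claim_equal_generatePreprocess : Prop := ∀ (numArray : List Int) (low : Int) (high : Int), Dom_generatePreprocess numArray low high → Spec_generatePreprocess numArray low high (generatePreprocess numArray low high)

-- ===== LEMMAS AND PROOFS =====

-- the foldl body of Source B's inner loop, with the `let` expanded (definitionally equal)
def pvF (v : Int) : (Int × List Int) → Int → (Int × List Int) :=
  fun st x => ((if x == v then st.1 + 1 else st.1),
               st.2 ++ [if x == v then st.1 + 1 else st.1])

theorem pvAltRow_eq (v : Int) (xs : List Int) : pvAltRow v xs = xs.foldl (pvF v) (0, []) := rfl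

-- a single-row update function capturing A's inner-loop body for column k
def pvHK (low num : Int) (k : Nat) (j : Nat) (row : List Int) : List Int :=
  if (j : Int) + low = num then
    (if k = 0 then row.set 0 1 else row.set k (row.getD (k-1) 0 + 1))
  else
    (if k ≠ 0 then row.set k (row.getD (k-1) 0) else row)

theorem pvF_len (v : Int) :
    ∀ (xs : List Int) (c : Int) (r : List Int),
      ((xs.foldl (pvF v) (c, r)).2).length = r.length + xs.length := by
  intro xs
  induction xs with
  | nil => intro c r; simp
  | cons x t ih =>
      intro c r
      simp only [List.foldl_cons, pvF]
      rw [ih]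
      simp only [List.length_append, List.length_cons, List.length_nil]
      omega

theorem pvAltRow_len (v : Int) (xs : List Int) : (pvAltRow v xs).2.length = xs.length := by
  rw [pvAltRow_eq]
  simpa using pvF_len v xs 0 []

theorem pvAltRow_append (v : Int) (xs : List Int) (x : Int) :
    pvAltRow v (xs ++ [x]) =
      ((if x == v then (pvAltRow v xs).1 + 1 else (pvAltRow v xs).1),
       (pvAltRow v xs).2 ++ [if x == v then (pvAltRow v xs).1 + 1 else (pvAltRow v xs).1]) := by
  rw [pvAltRow_eq, pvAltRow_eq, List.foldl_append]
  rfl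

theorem pvAltRow_last (v : Int) (xs : List Int) :
    (pvAltRow v xs).2.getD (xs.length - 1) 0 = (pvAltRow v xs).1 := by
  rcases List.eq_nil_or_concat xs with rfl | ⟨ys, y, rfl⟩
  · simp [pvAltRow]
  · simp only [List.concat_eq_append]
    rw [pvAltRow_append]
    have hl := pvAltRow_len v ys
    have h1 : (ys ++ [y]).length - 1 = (pvAltRow v ys).2.length := by
      simp [hl]
    rw [h1, List.getD_append_right _ _ _ _ (le_refl _)]
    simp

theorem set_getD_self (l : List (List Int)) (i : Nat) : l.set i (l.getD i []) = l := by
  by_cases h : i < l.length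
  · rw [List.getD_eq_getElem?_getD, List.getElem?_eq_getElem h]
    simp only [Option.getD_some]
    exact List.set_getElem_self h
  · exact List.set_eq_of_length_le (by omega)

theorem set_map_range (R : Nat) (f : Nat → List Int) (r : Nat) (w : List Int) :
    ((List.range R).map f).set r w
      = (List.range R).map (fun j => if j = r then w else f j) := by
  by_cases hr : r < R
  · apply List.ext_getElem (by simp)
    intro j h1 h2
    simp only [List.length_set, List.length_map, List.length_range] at h1 h2
    by_cases hj : r = j
    · subst hj
      rw [List.getElem_set_self]
      simp
    · rw [List.getElem_set_ne hj]
      simp [Ne.symm hj]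
  · rw [List.set_eq_of_length_le (by simp; omega)]
    apply List.map_congr_left
    intro j hj
    have : j ≠ r := by have := List.mem_range.mp hj; omega
    simp [this]

theorem foldl_fun_congr {α β : Type} (f g : α → β → α) (hfg : ∀ a b, f a b = g a b) :
    ∀ (l : List β) (init : α), l.foldl f init = l.foldl g init := by
  intro l
  induction l with
  | nil => intro init; rfl
  | cons x t ih => intro init; simp only [List.foldl_cons, hfg]; exact ih _

theorem setLoop (h : Nat → List Int → List Int) :
    ∀ (r R : Nat) (g : Nat → List Int), r ≤ R →
      (List.range r).foldl (fun dp j => dp.set j (h j (dp.getD j []))) ((List.range R).map g)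
        = (List.range R).map (fun j => if j < r then h j (g j) else g j) := by
  intro r
  induction r with
  | zero => intro R g _; simp
  | succ r ih =>
      intro R g hr
      rw [List.range_succ, List.foldl_append, ih R g (by omega)]
      simp only [List.foldl_cons, List.foldl_nil]
      have hget : ((List.range R).map (fun j => if j < r then h j (g j) else g j)).getD r []
          = g r := by
        rw [List.getD_eq_getElem?_getD]
        rw [List.getElem?_map, List.getElem?_range (show r < R by omega)]
        simp
      rw [hget, set_map_range]
      apply List.map_congr_left
      intro j hj
      by_cases hjr : j = r
      · subst hjr; simp
      · simp only [if_neg hjr]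
        by_cases hlt : j < r
        · rw [if_pos hlt, if_pos (by omega)]
        · rw [if_neg hlt, if_neg (by omega)]

theorem rowStep (v : Int) (xs : List Int) (k : Nat) (hk : k < xs.length) :
    (if v = xs.getD k 0 then
       (if k = 0 then ((pvAltRow v (xs.take k)).2 ++ List.replicate (xs.length - k) (0:Int)).set 0 1
        else ((pvAltRow v (xs.take k)).2 ++ List.replicate (xs.length - k) (0:Int)).set k
               (((pvAltRow v (xs.take k)).2 ++ List.replicate (xs.length - k) (0:Int)).getD (k-1) 0 + 1))
     else
       (if k ≠ 0 then ((pvAltRow v (xs.take k)).2 ++ List.replicate (xs.length - k) (0:Int)).set k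
               (((pvAltRow v (xs.take k)).2 ++ List.replicate (xs.length - k) (0:Int)).getD (k-1) 0)
        else (pvAltRow v (xs.take k)).2 ++ List.replicate (xs.length - k) (0:Int)))
    = (pvAltRow v (xs.take (k+1))).2 ++ List.replicate (xs.length - (k+1)) (0:Int) := by
  have htake : xs.take (k+1) = xs.take k ++ [xs[k]] := by
    rw [List.take_add_one, List.getElem?_eq_getElem hk]
    rfl
  have hlenr : (pvAltRow v (xs.take k)).2.length = k := by
    rw [pvAltRow_len, List.length_take]; omega
  have hnum : xs.getD k 0 = xs[k] := by
    rw [List.getD_eq_getElem?_getD, List.getElem?_eq_getElem hk]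
    rfl
  have hrep : List.replicate (xs.length - k) (0:Int) = 0 :: List.replicate (xs.length - (k+1)) 0 := by
    rw [show xs.length - k = (xs.length - (k+1)) + 1 by omega, List.replicate_succ]
  have hgetD : k ≠ 0 →
      ((pvAltRow v (xs.take k)).2 ++ List.replicate (xs.length - k) (0:Int)).getD (k-1) 0
        = (pvAltRow v (xs.take k)).1 := by
    intro hk0
    rw [List.getD_append _ _ _ _ (by omega)]
    have hlast := pvAltRow_last v (xs.take k)
    rw [List.length_take, show min k xs.length - 1 = k - 1 by omega] at hlast
    exact hlast
  have hset : ∀ w : Int,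
      ((pvAltRow v (xs.take k)).2 ++ List.replicate (xs.length - k) (0:Int)).set k w
        = (pvAltRow v (xs.take k)).2 ++ w :: List.replicate (xs.length - (k+1)) 0 := by
    intro w
    rw [List.set_append_right _ _ (by omega), hlenr, hrep]
    simp
  rw [htake, pvAltRow_append]
  by_cases hv : v = xs[k]
  · have hbeq : (xs[k] == v) = true := by simp [hv]
    rw [if_pos (by rw [hnum]; exact hv)]
    simp only [hbeq]
    by_cases hk0 : k = 0
    · subst hk0
      have hr : (pvAltRow v (xs.take 0)).2 = [] := by simp [pvAltRow]
      have hc : (pvAltRow v (xs.take 0)).1 = 0 := by simp [pvAltRow]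
      rw [if_pos rfl, hset 1, hr, hc]
      simp
    · rw [if_neg hk0, hset, hgetD hk0]
      simp
  · have hbeq : (xs[k] == v) = false := by
      simp only [beq_eq_false_iff_ne, ne_eq]
      intro h; exact hv h.symm
    rw [if_neg (by rw [hnum]; exact hv)]
    simp only [hbeq]
    by_cases hk0 : k = 0
    · subst hk0
      have hr : (pvAltRow v (xs.take 0)).2 = [] := by simp [pvAltRow]
      have hc : (pvAltRow v (xs.take 0)).1 = 0 := by simp [pvAltRow]
      rw [if_neg (by simp), hr, hc, hrep]
      simp
    · rw [if_pos hk0, hset, hgetD hk0]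
      simp

theorem A_norm (numArray : List Int) (low high : Int) :
    generatePreprocess numArray low high =
      (List.range numArray.length).foldl
        (fun dp (k : Nat) =>
          (List.range (high - low + 1).toNat).foldl
            (fun dp (j : Nat) => dp.set j (pvHK low (numArray.getD k 0) k j (dp.getD j []))) dp)
        ((List.range (high - low + 1).toNat).map
          (fun _ => List.replicate numArray.length (0:Int))) := by
  unfold generatePreprocess
  simp only [PySem.List.pyRange_one, Int.sub_zero, zero_add, Int.toNat_natCast,
    List.foldl_map, List.map_map, Function.comp_def, PySem.List.pyGetD_natCast]
  have hinit : (List.range (high - low + 1).toNat).map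
        (fun _ => (List.range numArray.length).map (fun _ => (0:Int)))
      = (List.range (high - low + 1).toNat).map
        (fun _ => List.replicate numArray.length (0:Int)) := by
    simp
  rw [← hinit]
  apply foldl_fun_congr
  intro dp k
  apply foldl_fun_congr
  intro dp' j
  simp only [beq_iff_eq, bne_iff_ne, ne_eq]
  unfold pvHK
  cases k with
  | zero =>
      simp only [Nat.cast_zero, List.getD_eq_getElem?_getD]
      by_cases hc : (j : Int) + low = numArray[0]?.getD 0
      · rw [if_pos hc, if_pos hc]
        simp
      · rw [if_neg hc, if_neg hc, ← List.getD_eq_getElem?_getD]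
        exact (set_getD_self _ _).symm
  | succ m =>
      have h1 : (((m+1 : Nat)) : Int) = (m : Int) + 1 := by push_cast; ring
      have hcast : ((m : Int) + 1) - 1 = (m : Int) := by ring
      have h0 : ¬ ((m : Int) + 1 = 0) := by omega
      have h0' : ¬ (m + 1 = 0) := by omega
      simp only [h1, hcast, if_neg h0, if_pos h0, if_neg h0', if_pos h0',
        PySem.List.pyGetD_natCast, Nat.add_sub_cancel, List.getD_eq_getElem?_getD]
      by_cases hc : (j : Int) + low = numArray[m+1]?.getD 0
      · rw [if_pos hc, if_pos hc]
      · rw [if_neg hc, if_neg hc]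

theorem invA (numArray : List Int) (low high : Int) :
    ∀ k, k ≤ numArray.length →
      (List.range k).foldl
        (fun dp (k' : Nat) =>
          (List.range (high - low + 1).toNat).foldl
            (fun dp (j : Nat) => dp.set j (pvHK low (numArray.getD k' 0) k' j (dp.getD j []))) dp)
        ((List.range (high - low + 1).toNat).map
          (fun _ => List.replicate numArray.length (0:Int)))
      = (List.range (high - low + 1).toNat).map
          (fun (j : Nat) => (pvAltRow (low + (j : Int)) (numArray.take k)).2
              ++ List.replicate (numArray.length - k) (0:Int)) := by
  intro k
  induction k with
  | zero => intro _; simp [pvAltRow]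
  | succ k ih =>
      intro hk
      rw [List.range_succ, List.foldl_append, ih (by omega)]
      simp only [List.foldl_cons, List.foldl_nil]
      rw [setLoop (fun j row => pvHK low (numArray.getD k 0) k j row)
            (high - low + 1).toNat (high - low + 1).toNat
            (fun (j : Nat) => (pvAltRow (low + (j : Int)) (numArray.take k)).2
              ++ List.replicate (numArray.length - k) (0:Int)) (le_refl _)]
      apply List.map_congr_left
      intro j hj
      rw [if_pos (List.mem_range.mp hj)]
      unfold pvHK
      have hcond : ((j : Int) + low = numArray.getD k 0) ↔ (low + (j : Int) = numArray.getD k 0) := by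
        constructor <;> intro h <;> omega
      simp only [hcond]
      exact rowStep (low + (j : Int)) numArray k (by omega)

theorem B_norm (numArray : List Int) (low high : Int) :
    generatePreprocess_alt numArray low high
      = (List.range (high - low + 1).toNat).map
          (fun (j : Nat) => (pvAltRow (low + (j : Int)) numArray).2) := by
  unfold generatePreprocess_alt
  rw [PySem.List.foldl_append_singleton_eq_map, PySem.List.pyRange_one, List.map_map]
  rw [show high + 1 - low = high - low + 1 by ring]
  rfl

-- ===== VERDICT (by name: the statement is the Claim_ definition above) =====
theorem generatePreprocess_spec : Claim_equal_generatePreprocess := by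
  intro numArray low high _
  unfold Spec_generatePreprocess
  rw [A_norm, invA numArray low high numArray.length (le_refl _), B_norm]
  simp
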